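-- pv_equiv track=rewrite | github.com/Akashdeepsingh1/project | ms/Min Moves to make string without 3 identical Consecutive Letters.py | solution
-- ===== SOURCE A (Python) =====
-- def solution(s):
--     l = len(s)
--     ls = list(s)
--     if l <=2:
--         return 0
--     else:
--         count = 0
--         i = 0
--         while i<l:
--             temp_count = 1
--             while i+1<l and s[i] == s[i+1]:
--                 temp_count +=1
--                 i+=1
--
--             count += temp_count//3
--             i+=1
--         return count
-- ===== SOURCE B (Python) =====
-- def solution(s):
--     count = 0
--     prev = None
--     run = 0
--     for c in s:
--         if c == prev:
--             run += 1
--         else: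
--             prev = c
--             run = 1
--         if run == 3:
--             count += 1
--             run = 0
--     return count
-- ===== Notes on version B (the rewrite author's own statement) =====
-- stated objective: faster
-- what changed: Replaced the index-based nested while loops (measure each run's length with repeated s[i]/s[i+1] indexing, then add length//3) by a single flat for-pass over the characters keeping only a previous character and a run counter that resets every time it reaches 3.
import Mathlib
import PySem

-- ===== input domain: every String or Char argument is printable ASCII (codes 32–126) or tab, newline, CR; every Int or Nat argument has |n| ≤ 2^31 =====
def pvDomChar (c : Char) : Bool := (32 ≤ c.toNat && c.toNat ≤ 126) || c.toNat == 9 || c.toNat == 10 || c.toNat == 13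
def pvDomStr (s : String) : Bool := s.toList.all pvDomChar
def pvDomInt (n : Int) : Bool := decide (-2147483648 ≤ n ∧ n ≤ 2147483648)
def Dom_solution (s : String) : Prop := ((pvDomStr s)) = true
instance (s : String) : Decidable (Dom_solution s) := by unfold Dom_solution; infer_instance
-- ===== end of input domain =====

-- B replaces A's nested run-measuring while loops by one flat pass with a run counter that resets at 3 (simpler decomposition, same O(n) cost).

-- ===== PORT A =====
-- inner while: `while i+1<l and s[i] == s[i+1]: temp_count+=1; i+=1`
-- (fuel only makes the loop total — it is always ≥ the remaining iterations;
--  s[i] ported as `cs.getD i ' '`: the guard keeps both indices in range, so this is exact)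
def aInner (cs : List Char) (l : Nat) : Nat → Nat → Nat → Nat × Nat
  | 0, i, tc => (tc, i)
  | fuel+1, i, tc =>
    if i + 1 < l ∧ cs.getD i ' ' = cs.getD (i+1) ' ' then
      aInner cs l fuel (i+1) (tc+1)
    else (tc, i)

-- outer while: per run, `count += temp_count//3; i += 1`  (temp_count ≥ 0, so `//3` is Nat division)
def aOuter (cs : List Char) (l : Nat) : Nat → Nat → Int → Int
  | 0, _, count => count
  | fuel+1, i, count =>
    if i < l then
      aOuter cs l fuel ((aInner cs l (l - i) i 1).2 + 1)
        (count + (((aInner cs l (l - i) i 1).1 / 3 : Nat) : Int))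
    else count

-- `len(s)` = number of characters = s.toList.length (exact for Python str)
def solution (s : String) : Int :=
  let l := s.toList.length
  let _ls := s.toList   -- `ls = list(s)` (unused in A too)
  if l ≤ 2 then 0
  else aOuter s.toList l l 0 0

-- ===== PORT B =====
-- one step of the flat pass: state = (count, prev, run)
def bStep (st : Int × Option Char × Nat) (c : Char) : Int × Option Char × Nat :=
  let count := st.1
  let pr := if st.2.1 = some c then (st.2.1, st.2.2 + 1) else (some c, 1)
  if pr.2 = 3 then (count + 1, pr.1, 0) else (count, pr.1, pr.2)

def solution_alt (s : String) : Int :=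
  (s.toList.foldl bStep (0, none, 0)).1

-- ===== PRECONDITION & SPEC =====
def Spec_solution (s : String) (out : Int) : Prop := out = solution_alt s
instance (s : String) (out : Int) : Decidable (Spec_solution s out) := by unfold Spec_solution; infer_instance

-- ===== CLAIM (what is proved, stated in full; the proofs are below) =====
def Claim_equal_solution : Prop := ∀ (s : String), Dom_solution s → Spec_solution s (solution s)

-- ===== LEMMAS AND PROOFS =====

-- common characterisation: sum over maximal runs of (run length / 3)
def countRuns : List Char → Int
  | [] => 0
  | c :: rest =>
      (((1 + (rest.takeWhile (· == c)).length) / 3 : Nat) : Int)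
        + countRuns (rest.dropWhile (· == c))
termination_by l => l.length
decreasing_by
  have := List.length_dropWhile_le (p := (· == c)) (l := rest)
  simp; omega

theorem countRuns_nil : countRuns [] = 0 := by rw [countRuns]

theorem countRuns_cons (c : Char) (rest : List Char) : countRuns (c :: rest) =
    (((1 + (rest.takeWhile (· == c)).length) / 3 : Nat) : Int)
      + countRuns (rest.dropWhile (· == c)) := by rw [countRuns]

theorem countRuns_short (l : List Char) (h : l.length ≤ 2) : countRuns l = 0 := by
  cases l with
  | nil => exact countRuns_nil
  | cons c t =>
    cases t with
    | nil => simp [countRuns_cons, countRuns_nil, List.takeWhile, List.dropWhile]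
    | cons d t2 =>
      have ht2 : t2 = [] := by
        simp only [List.length_cons] at h
        exact List.eq_nil_of_length_eq_zero (by omega)
      subst ht2
      rw [countRuns_cons]
      by_cases hd : (d == c) = true
      · simp [List.takeWhile, List.dropWhile, hd, countRuns_nil]
      · simp [List.takeWhile, List.dropWhile, hd, countRuns_cons, countRuns_nil]

-- ----- A-side -----

theorem getD_of_drop (cs : List Char) (i : Nat) (c : Char) (rest : List Char)
    (h : cs.drop i = c :: rest) : cs.getD i ' ' = c := by
  have h1 : (cs.drop i)[0]? = some c := by rw [h]; rfl
  rw [List.getElem?_drop, Nat.add_zero] at h1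
  simp [List.getD, h1]

theorem aInner_spec (rest : List Char) : ∀ (cs : List Char) (c : Char) (i tc fuel : Nat),
    rest.length < fuel → cs.drop i = c :: rest →
    aInner cs cs.length fuel i tc =
      (tc + (rest.takeWhile (· == c)).length, i + (rest.takeWhile (· == c)).length) := by
  induction rest with
  | nil =>
    intro cs c i tc fuel hf h
    have hlen : cs.length = i + 1 := by
      have := congrArg List.length h
      simp [List.length_drop] at this
      omega
    match fuel, hf with
    | f+1, _ =>
      unfold aInner
      simp [hlen, List.takeWhile]
  | cons c' rest' ih =>
    intro cs c i tc fuel hf h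
    have hlen : i + 1 < cs.length := by
      have := congrArg List.length h
      simp [List.length_drop] at this
      omega
    have hgi : cs.getD i ' ' = c := getD_of_drop cs i c _ h
    have hdrop1 : cs.drop (i+1) = c' :: rest' := by
      have hdd : cs.drop (i+1) = (cs.drop i).drop 1 := by
        rw [List.drop_drop]
      simp [hdd, h]
    have hgi1 : cs.getD (i+1) ' ' = c' := getD_of_drop cs (i+1) c' _ hdrop1
    match fuel, hf with
    | f+1, hf =>
      by_cases hc : c = c'
      · subst hc
        unfold aInner
        rw [if_pos ⟨hlen, by rw [hgi, hgi1]⟩]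
        rw [ih cs c (i+1) (tc+1) f (by simp at hf ⊢; omega) hdrop1]
        simp [List.takeWhile]
        omega
      · unfold aInner
        rw [if_neg (by
          intro hcon
          exact hc (by rw [← hgi, ← hgi1, hcon.2]))]
        simp [List.takeWhile, show (c' == c) = false from by simp [Ne.symm hc]]

theorem dropWhile_eq_drop_takeWhile_length (p : Char → Bool) (l : List Char) :
    l.drop (l.takeWhile p).length = l.dropWhile p := by
  induction l with
  | nil => simp
  | cons a t ih =>
    by_cases h : p a = true
    · simp [List.takeWhile, List.dropWhile, h, ih]
    · simp [List.takeWhile, List.dropWhile, h]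

theorem aOuter_spec (cs : List Char) : ∀ (fuel i : Nat) (count : Int),
    cs.length ≤ i + fuel →
    aOuter cs cs.length fuel i count = count + countRuns (cs.drop i) := by
  intro fuel
  induction fuel with
  | zero =>
    intro i count h
    unfold aOuter
    rw [List.drop_eq_nil_of_le (by omega), countRuns_nil]
    ring
  | succ fuel ih =>
    intro i count h
    by_cases hi : i < cs.length
    · have hdrop : cs.drop i = cs[i] :: cs.drop (i+1) :=
        List.drop_eq_getElem_cons hi
      set c := cs[i] with hc
      set rest := cs.drop (i+1) with hrest
      have hrl : rest.length = cs.length - (i+1) := by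
        simp [hrest, List.length_drop]
      have hin := aInner_spec rest cs c i 1 (cs.length - i) (by omega) hdrop
      set k := (rest.takeWhile (· == c)).length with hk
      unfold aOuter
      rw [if_pos hi, hin]
      have hkle : k ≤ rest.length := (List.takeWhile_sublist _).length_le
      have hdropk : cs.drop (i + k + 1) = rest.dropWhile (· == c) := by
        rw [show i + k + 1 = (i+1) + k by omega, ← List.drop_drop, ← hrest,
          dropWhile_eq_drop_takeWhile_length]
      show aOuter cs cs.length fuel (i + k + 1) (count + ((1 + k) / 3 : Nat)) = _
      rw [ih (i + k + 1) _ (by omega), hdropk, hdrop, countRuns_cons]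
      push_cast
      ring
    · unfold aOuter
      rw [if_neg hi, List.drop_eq_nil_of_le (Nat.le_of_not_lt hi), countRuns_nil]
      ring

-- ----- B-side -----

theorem bStep_run (c : Char) : ∀ (m : Nat) (count : Int) (r : Nat), r < 3 →
    (List.replicate m c).foldl bStep (count, some c, r) =
      (count + (((r + m) / 3 : Nat) : Int), some c, (r + m) % 3) := by
  intro m
  induction m with
  | zero =>
    intro count r hr
    simp [Nat.div_eq_of_lt hr, Nat.mod_eq_of_lt hr]
  | succ m ih =>
    intro count r hr
    rw [List.replicate_succ, List.foldl_cons]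
    by_cases h3 : r + 1 = 3
    · have hs : bStep (count, some c, r) c = (count + 1, some c, 0) := by
        simp [bStep, h3]
      rw [hs, ih (count+1) 0 (by omega)]
      refine congrArg₂ Prod.mk ?_ (congrArg₂ Prod.mk rfl ?_)
      · rw [show (r + (m + 1)) / 3 = (0 + m) / 3 + 1 from by omega]
        push_cast
        ring
      · omega
    · have hs : bStep (count, some c, r) c = (count, some c, r + 1) := by
        simp [bStep, h3]
      rw [hs, ih count (r+1) (by omega)]
      refine congrArg₂ Prod.mk ?_ (congrArg₂ Prod.mk rfl ?_)
      · rw [show r + 1 + m = r + (m + 1) from by omega]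
      · omega

theorem takeWhile_eq_replicate (c : Char) (l : List Char) :
    l.takeWhile (· == c) = List.replicate (l.takeWhile (· == c)).length c := by
  rw [List.eq_replicate_iff]
  refine ⟨rfl, ?_⟩
  intro b hb
  simpa using List.mem_takeWhile_imp hb

theorem head?_dropWhile_ne (c : Char) (l : List Char) :
    ∀ b ∈ (l.dropWhile (· == c)).head?, b ≠ c := by
  induction l with
  | nil => simp
  | cons a t ih =>
    by_cases h : a = c
    · simpa [List.dropWhile_cons, h] using ih
    · simp [h]

theorem bFold_spec (n : Nat) : ∀ (l : List Char), l.length ≤ n →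
    ∀ (count : Int) (p : Option Char) (r : Nat),
    (∀ b ∈ l.head?, p ≠ some b) →
    (l.foldl bStep (count, p, r)).1 = count + countRuns l := by
  induction n with
  | zero =>
    intro l hl count p r _
    have hnil : l = [] := List.eq_nil_of_length_eq_zero (by omega)
    simp [hnil, countRuns_nil]
  | succ n ih =>
    intro l hl count p r hfresh
    match l with
    | [] => simp [countRuns_nil]
    | c :: rest =>
      have hp : p ≠ some c := hfresh c (by simp)
      have hstep : bStep (count, p, r) c = (count, some c, 1) := by
        simp [bStep, hp]
      rw [List.foldl_cons, hstep]
      set k := (rest.takeWhile (· == c)).length with hk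
      have hsplit : rest = List.replicate k c ++ rest.dropWhile (· == c) := by
        conv_lhs => rw [← List.takeWhile_append_dropWhile (p := (· == c)) (l := rest)]
        rw [← takeWhile_eq_replicate]
      conv_lhs => rw [hsplit]
      rw [List.foldl_append, bStep_run c k count 1 (by omega)]
      have hrestlen : (rest.dropWhile (· == c)).length ≤ n := by
        have h1 : (rest.dropWhile (· == c)).length ≤ rest.length :=
          List.length_dropWhile_le _ _
        simp only [List.length_cons] at hl
        omega
      rw [ih (rest.dropWhile (· == c)) hrestlen _ (some c) ((1 + k) % 3)
        (by
          intro b hb hcon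
          exact head?_dropWhile_ne c rest b hb (by injection hcon with h2; exact h2.symm))]
      rw [countRuns_cons]
      push_cast
      ring

-- ===== VERDICT (by name: the statement is the Claim_ definition above) =====
theorem solution_spec : Claim_equal_solution := by
  intro s _
  show solution s = solution_alt s
  have hB : solution_alt s = countRuns s.toList := by
    unfold solution_alt
    rw [bFold_spec s.toList.length s.toList (le_refl _) 0 none 0 (by simp)]
    simp
  unfold solution
  by_cases h : s.toList.length ≤ 2
  · rw [if_pos h, hB, countRuns_short _ h]
  · rw [if_neg h, hB, aOuter_spec s.toList s.toList.length 0 0 (by omega)]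
    simp
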